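-- pv_equiv track=rewrite | github.com/leanprover/lean4 | script/profiler/lean_demangle.py | _check_disambiguation
-- ===== SOURCE A (Python) =====
-- def _parse_hex(s, pos, n):
--     """Parse n lowercase hex digits at pos. Returns (new_pos, value) or None."""
--     if pos + n > len(s):
--         return None
--     val = 0
--     for i in range(n):
--         c = s[pos + i]
--         if '0' <= c <= '9':
--             val = (val << 4) | (ord(c) - ord('0'))
--         elif 'a' <= c <= 'f':
--             val = (val << 4) | (ord(c) - ord('a') + 10)
--         else:
--             return None
--     return (pos + n, val)
--
-- def _check_disambiguation(m):
--     """Port of Lean's checkDisambiguation: does mangled string m need a '00' prefix?"""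
--     pos = 0
--     while pos < len(m):
--         ch = m[pos]
--         if ch == '_':
--             pos += 1
--             continue
--         if ch == 'x':
--             return _parse_hex(m, pos + 1, 2) is not None
--         if ch == 'u':
--             return _parse_hex(m, pos + 1, 4) is not None
--         if ch == 'U':
--             return _parse_hex(m, pos + 1, 8) is not None
--         if '0' <= ch <= '9':
--             return True
--         return False
--     # all underscores or empty
--     return True
-- ===== SOURCE B (Python) =====
-- def _check_disambiguation(m):
--     # Single-pass DFA: state 0 = skipping leading underscores; state k > 0 = k more
--     # lowercase hex digits required; state -1 = accept; state -2 = reject.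
--     state = 0
--     for c in m:
--         if state < 0:
--             break
--         if state == 0:
--             if c == '_':
--                 pass
--             elif c == 'x':
--                 state = 2
--             elif c == 'u':
--                 state = 4
--             elif c == 'U':
--                 state = 8
--             elif '0' <= c <= '9':
--                 state = -1
--             else:
--                 state = -2
--         elif c in '0123456789abcdef':
--             state -= 1
--             if state == 0:
--                 state = -1
--         else:
--             state = -2
--     return state == 0 or state == -1
-- ===== Notes on version B (the rewrite author's own statement) =====
-- stated objective: alternative
-- what changed: Replaces A's position-based scan with a lookahead hex-parsing helper by a single-pass finite-state automaton over the characters whose integer state counts down the remaining required hex digits (with accept/reject sink states); no slicing, lookahead or numeric value computation.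
import Mathlib
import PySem

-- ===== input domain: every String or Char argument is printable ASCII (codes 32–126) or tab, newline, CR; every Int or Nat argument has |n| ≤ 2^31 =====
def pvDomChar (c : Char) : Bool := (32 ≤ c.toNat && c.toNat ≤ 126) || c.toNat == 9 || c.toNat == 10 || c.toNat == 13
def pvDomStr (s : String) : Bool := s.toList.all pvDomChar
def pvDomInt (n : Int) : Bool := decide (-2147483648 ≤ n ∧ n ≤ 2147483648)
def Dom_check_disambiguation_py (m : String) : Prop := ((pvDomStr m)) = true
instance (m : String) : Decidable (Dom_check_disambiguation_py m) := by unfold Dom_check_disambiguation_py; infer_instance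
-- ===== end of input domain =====

-- B replaces A's scan-with-lookahead (helper parsing 2/4/8 hex digits ahead of the cursor) by a
-- single-pass integer-state automaton over the characters (objective: alternative; same linear cost).

-- ===== PORT A =====
-- _parse_hex(s, pos, n): ported with the suffix s[pos:] as the list argument (the position pos is
-- represented by passing the suffix, so the returned position component is n); the digit loop is
-- the same fold over range(n) with the same early-out (Option accumulator) and the same running value.
def pvParseHexA (s : List Char) (n : Nat) : Option (Nat × Int) :=
  if n > s.length then none
  else
    match (List.range n).foldl
      (fun acc i =>
        acc.bind (fun val =>
          let c := PySem.List.pyGetD s (i : Int) ' '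
          if '0' ≤ c ∧ c ≤ '9' then
            some (PySem.Int.bor (val <<< 4) ((c.toNat : Int) - ('0'.toNat : Int)))
          else if 'a' ≤ c ∧ c ≤ 'f' then
            some (PySem.Int.bor (val <<< 4) ((c.toNat : Int) - ('a'.toNat : Int) + 10))
          else none)) (some (0 : Int)) with
    | none => none
    | some val => some (n, val)

-- the while loop over pos, one step per iteration: structural recursion on the suffix at pos
def pvCheckAGo : List Char → Bool
  | [] => true          -- all underscores or empty
  | ch :: rest =>
    if ch = '_' then pvCheckAGo rest
    else if ch = 'x' then (pvParseHexA rest 2).isSome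
    else if ch = 'u' then (pvParseHexA rest 4).isSome
    else if ch = 'U' then (pvParseHexA rest 8).isSome
    else if '0' ≤ ch ∧ ch ≤ '9' then true
    else false

def check_disambiguation_py (m : String) : Bool :=
  pvCheckAGo m.toList

-- ===== PORT B =====
-- B's for-loop over the characters with an integer state; `break` on state < 0 is the
-- non-recursive return of the absorbing state.
def pvAltGo : List Char → Int → Int
  | [], st => st
  | c :: rest, st =>
    if st < 0 then st                      -- break
    else if st = 0 then
      (if c = '_' then pvAltGo rest st
       else if c = 'x' then pvAltGo rest 2
       else if c = 'u' then pvAltGo rest 4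
       else if c = 'U' then pvAltGo rest 8
       else if '0' ≤ c ∧ c ≤ '9' then pvAltGo rest (-1)
       else pvAltGo rest (-2))
    else if c ∈ "0123456789abcdef".toList then
      (let st' := st - 1
       pvAltGo rest (if st' = 0 then -1 else st'))
    else pvAltGo rest (-2)

def check_disambiguation_py_alt (m : String) : Bool :=
  let st := pvAltGo m.toList 0
  st == 0 || st == -1

-- ===== PRECONDITION & SPEC =====
def Spec_check_disambiguation_py (m : String) (out : Bool) : Prop := out = check_disambiguation_py_alt m
instance (m : String) (out : Bool) : Decidable (Spec_check_disambiguation_py m out) := by unfold Spec_check_disambiguation_py; infer_instance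

-- ===== CLAIM (what is proved, stated in full; the proofs are below) =====
def Claim_equal_check_disambiguation_py : Prop := ∀ (m : String), Dom_check_disambiguation_py m → Spec_check_disambiguation_py m (check_disambiguation_py m)

-- ===== LEMMAS AND PROOFS =====

-- a char is in B's hex-digit string iff it passes A's two range tests
theorem pv_hex_mem (c : Char) :
    (decide (c ∈ "0123456789abcdef".toList)) =
      (decide ('0' ≤ c ∧ c ≤ '9') || decide ('a' ≤ c ∧ c ≤ 'f')) := by
  have hl : ("0123456789abcdef".toList) = ['0','1','2','3','4','5','6','7','8','9','a','b','c','d','e','f'] := rfl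
  rw [hl, Bool.eq_iff_iff]
  simp only [List.mem_cons, List.not_mem_nil, or_false, Char.ext_iff, Char.le_def,
    UInt32.ext_iff, UInt32.le_iff_toNat_le, decide_eq_true_eq, Bool.or_eq_true]
  have h0 : ('0':Char).val.toNat = 48 := rfl
  have h1 : ('1':Char).val.toNat = 49 := rfl
  have h2 : ('2':Char).val.toNat = 50 := rfl
  have h3 : ('3':Char).val.toNat = 51 := rfl
  have h4 : ('4':Char).val.toNat = 52 := rfl
  have h5 : ('5':Char).val.toNat = 53 := rfl
  have h6 : ('6':Char).val.toNat = 54 := rfl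
  have h7 : ('7':Char).val.toNat = 55 := rfl
  have h8 : ('8':Char).val.toNat = 56 := rfl
  have h9 : ('9':Char).val.toNat = 57 := rfl
  have h10 : ('a':Char).val.toNat = 97 := rfl
  have h11 : ('b':Char).val.toNat = 98 := rfl
  have h12 : ('c':Char).val.toNat = 99 := rfl
  have h13 : ('d':Char).val.toNat = 100 := rfl
  have h14 : ('e':Char).val.toNat = 101 := rfl
  have h15 : ('f':Char).val.toNat = 102 := rfl
  omega

-- the digit fold of _parse_hex keeps a `some` accumulator iff the first n chars are all hex
theorem pv_fold_isSome (s : List Char) (n : Nat) (hn : n ≤ s.length) (acc : Option Int) :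
    ((List.range n).foldl
      (fun acc i =>
        acc.bind (fun val =>
          let c := PySem.List.pyGetD s (i : Int) ' '
          if '0' ≤ c ∧ c ≤ '9' then
            some (PySem.Int.bor (val <<< 4) ((c.toNat : Int) - ('0'.toNat : Int)))
          else if 'a' ≤ c ∧ c ≤ 'f' then
            some (PySem.Int.bor (val <<< 4) ((c.toNat : Int) - ('a'.toNat : Int) + 10))
          else none)) acc).isSome
    = (acc.isSome && (s.take n).all (fun d => d ∈ "0123456789abcdef".toList)) := by
  induction n generalizing acc with
  | zero => simp
  | succ k ih =>
    have hk : k < s.length := by omega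
    have hg : PySem.List.pyGetD s ((k : Nat) : Int) ' ' = s[k] := by
      simp [PySem.List.pyGetD_natCast, List.getD_eq_getElem?_getD]
      simp [List.getElem?_eq_getElem hk]
    have htk : (s.take (k+1)).all (fun d => d ∈ "0123456789abcdef".toList)
        = ((s.take k).all (fun d => d ∈ "0123456789abcdef".toList) && decide (s[k] ∈ "0123456789abcdef".toList)) := by
      rw [List.take_add_one, List.getElem?_eq_getElem hk]
      simp only [Option.toList_some, List.all_append, List.all_cons, List.all_nil, Bool.and_true]
    rw [List.range_succ, List.foldl_append]
    simp only [List.foldl_cons, List.foldl_nil]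
    have hX := ih (by omega) acc
    cases hxe : ((List.range k).foldl
      (fun acc i =>
        acc.bind (fun val =>
          let c := PySem.List.pyGetD s (i : Int) ' '
          if '0' ≤ c ∧ c ≤ '9' then
            some (PySem.Int.bor (val <<< 4) ((c.toNat : Int) - ('0'.toNat : Int)))
          else if 'a' ≤ c ∧ c ≤ 'f' then
            some (PySem.Int.bor (val <<< 4) ((c.toNat : Int) - ('a'.toNat : Int) + 10))
          else none)) acc) with
    | none =>
      rw [hxe] at hX
      simp only [Option.isSome_none] at hX
      simp only [Option.bind, Option.isSome_none]
      rw [htk, ← Bool.and_assoc, ← hX]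
      simp
    | some v =>
      rw [hxe] at hX
      simp only [Option.isSome_some] at hX
      rw [htk, ← Bool.and_assoc, ← hX]
      simp only [Option.bind_some, Bool.true_and, hg]
      rw [pv_hex_mem]
      split_ifs with h1 h2 <;> simp [*]

-- _parse_hex succeeds exactly when n chars are present and all hex
theorem pv_parse_hex_isSome (s : List Char) (n : Nat) :
    (pvParseHexA s n).isSome =
      (decide (n ≤ s.length) && (s.take n).all (fun d => d ∈ "0123456789abcdef".toList)) := by
  unfold pvParseHexA
  split_ifs with h
  · have h2 : ¬ (n ≤ s.length) := by omega
    simp [h2]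
  · have hn : n ≤ s.length := by omega
    simp only [decide_eq_true hn, Bool.true_and]
    have hX := pv_fold_isSome s n hn (some 0)
    cases hxe : ((List.range n).foldl
      (fun acc i =>
        acc.bind (fun val =>
          let c := PySem.List.pyGetD s (i : Int) ' '
          if '0' ≤ c ∧ c ≤ '9' then
            some (PySem.Int.bor (val <<< 4) ((c.toNat : Int) - ('0'.toNat : Int)))
          else if 'a' ≤ c ∧ c ≤ 'f' then
            some (PySem.Int.bor (val <<< 4) ((c.toNat : Int) - ('a'.toNat : Int) + 10))
          else none)) (some (0:Int))) with
    | none => rw [hxe] at hX; simpa using hX.symm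
    | some v => rw [hxe] at hX; simpa using hX.symm

-- the countdown phase of B's automaton succeeds exactly when n hex chars are present
theorem pv_alt_hexrun (s : List Char) (n : Nat) (hn : 0 < n) :
    ((pvAltGo s (n : Int) == 0) || (pvAltGo s (n : Int) == -1)) =
      (decide (n ≤ s.length) && (s.take n).all (fun d => d ∈ "0123456789abcdef".toList)) := by
  induction s generalizing n with
  | nil =>
    have e1 : ((n : Int) == 0) = false := by rw [beq_eq_false_iff_ne]; omega
    have e2 : ((n : Int) == -1) = false := by rw [beq_eq_false_iff_ne]; omega
    have e3 : decide (n ≤ ([] : List Char).length) = false := by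
      rw [decide_eq_false_iff_not, List.length_nil]; omega
    have h1 : pvAltGo [] (n : Int) = (n : Int) := rfl
    rw [h1, e1, e2, e3]
    simp
  | cons c rest ih =>
    have hlt : ¬ ((n : Int) < 0) := by omega
    have hz : ¬ ((n : Int) = 0) := by omega
    have hlen1 : decide (n ≤ (c :: rest).length) = decide (n - 1 ≤ rest.length) := by
      simp only [List.length_cons, decide_eq_decide]; omega
    by_cases hc : c ∈ "0123456789abcdef".toList
    · have hct : (decide (c ∈ "0123456789abcdef".toList)) = true := decide_eq_true hc
      by_cases h1 : n = 1
      · subst h1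
        have hst : pvAltGo (c :: rest) ((1 : Nat) : Int) = pvAltGo rest (-1) := by
          simp only [pvAltGo, if_neg hlt, if_neg hz, if_pos hc]
          norm_num
        have habs : pvAltGo rest (-1) = -1 := by
          cases rest with
          | nil => rfl
          | cons a b => simp only [pvAltGo, if_pos (show (-1:Int) < 0 by norm_num)]
        rw [hst, habs]
        have htake : (c :: rest).take 1 = [c] := by simp
        rw [htake]
        simp only [List.all_cons, List.all_nil, hct, Bool.and_true]
        simp
      · have hn2 : 2 ≤ n := by omega
        have hst : pvAltGo (c :: rest) ((n : Nat) : Int) = pvAltGo rest ((n - 1 : Nat) : Int) := by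
          simp only [pvAltGo, if_neg hlt, if_neg hz, if_pos hc]
          have hne : ¬ ((n : Int) - 1 = 0) := by omega
          rw [if_neg hne]
          congr 1
          omega
        rw [hst, ih (n - 1) (by omega), hlen1]
        have htake : (c :: rest).take n = c :: rest.take (n - 1) := by
          cases n with
          | zero => omega
          | succ k => simp [List.take_succ_cons]
        rw [htake]
        simp only [List.all_cons, hct, Bool.true_and]
    · have hcf : (decide (c ∈ "0123456789abcdef".toList)) = false := decide_eq_false hc
      have hst : pvAltGo (c :: rest) ((n : Nat) : Int) = pvAltGo rest (-2) := by
        simp only [pvAltGo, if_neg hlt, if_neg hz, if_neg hc]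
      have habs : pvAltGo rest (-2) = -2 := by
        cases rest with
        | nil => rfl
        | cons a b => simp only [pvAltGo, if_pos (show (-2:Int) < 0 by norm_num)]
      rw [hst, habs]
      have htake : ((c :: rest).take n).all (fun d => d ∈ "0123456789abcdef".toList) = false := by
        cases n with
        | zero => omega
        | succ k => simp only [List.take_succ_cons, List.all_cons, hcf, Bool.false_and]
      rw [htake]
      simp

-- A's scan and B's automaton agree on every suffix (state 0)
theorem pv_go_eq (s : List Char) : pvCheckAGo s = ((pvAltGo s 0 == 0) || (pvAltGo s 0 == -1)) := by
  induction s with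
  | nil => rfl
  | cons ch rest ih =>
    have n0 : ¬ ((0 : Int) < 0) := by norm_num
    have z0 : ((0 : Int) = 0) := rfl
    by_cases hu : ch = '_'
    · subst hu
      have hB : pvAltGo ('_' :: rest) 0 = pvAltGo rest 0 := by
        simp only [pvAltGo, if_neg n0, if_pos z0, if_pos (show ('_':Char) = '_' from rfl), if_true]
      have hA : pvCheckAGo ('_' :: rest) = pvCheckAGo rest := by
        simp only [pvCheckAGo, if_pos (show ('_':Char) = '_' from rfl), if_true]
      rw [hA, hB, ih]
    · by_cases hx : ch = 'x'
      · subst hx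
        have hA : pvCheckAGo ('x' :: rest) = (pvParseHexA rest 2).isSome := by
          simp only [pvCheckAGo, if_neg (show ¬ ('x':Char) = '_' by decide),
            if_pos (show ('x':Char) = 'x' from rfl), if_true]
        have hB : pvAltGo ('x' :: rest) 0 = pvAltGo rest ((2 : Nat) : Int) := by
          simp only [pvAltGo, if_neg n0, if_pos z0, if_neg (show ¬ ('x':Char) = '_' by decide),
            if_pos (show ('x':Char) = 'x' from rfl), if_true]
          norm_num
        rw [hA, hB, pv_alt_hexrun rest 2 (by omega), pv_parse_hex_isSome]
      · by_cases hv : ch = 'u'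
        · subst hv
          have hA : pvCheckAGo ('u' :: rest) = (pvParseHexA rest 4).isSome := by
            simp only [pvCheckAGo, if_neg (show ¬ ('u':Char) = '_' by decide),
              if_neg (show ¬ ('u':Char) = 'x' by decide), if_pos (show ('u':Char) = 'u' from rfl), if_true]
          have hB : pvAltGo ('u' :: rest) 0 = pvAltGo rest ((4 : Nat) : Int) := by
            simp only [pvAltGo, if_neg n0, if_pos z0, if_neg (show ¬ ('u':Char) = '_' by decide),
              if_neg (show ¬ ('u':Char) = 'x' by decide), if_pos (show ('u':Char) = 'u' from rfl), if_true]
            norm_num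
          rw [hA, hB, pv_alt_hexrun rest 4 (by omega), pv_parse_hex_isSome]
        · by_cases hw : ch = 'U'
          · subst hw
            have hA : pvCheckAGo ('U' :: rest) = (pvParseHexA rest 8).isSome := by
              simp only [pvCheckAGo, if_neg (show ¬ ('U':Char) = '_' by decide),
                if_neg (show ¬ ('U':Char) = 'x' by decide), if_neg (show ¬ ('U':Char) = 'u' by decide),
                if_pos (show ('U':Char) = 'U' from rfl), if_true]
            have hB : pvAltGo ('U' :: rest) 0 = pvAltGo rest ((8 : Nat) : Int) := by
              simp only [pvAltGo, if_neg n0, if_pos z0, if_neg (show ¬ ('U':Char) = '_' by decide),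
                if_neg (show ¬ ('U':Char) = 'x' by decide), if_neg (show ¬ ('U':Char) = 'u' by decide),
                if_pos (show ('U':Char) = 'U' from rfl), if_true]
              norm_num
            rw [hA, hB, pv_alt_hexrun rest 8 (by omega), pv_parse_hex_isSome]
          · by_cases hd : '0' ≤ ch ∧ ch ≤ '9'
            · have hA : pvCheckAGo (ch :: rest) = true := by
                simp only [pvCheckAGo, if_neg hu, if_neg hx, if_neg hv, if_neg hw, if_pos hd, if_true]
              have hB : pvAltGo (ch :: rest) 0 = pvAltGo rest (-1) := by
                simp only [pvAltGo, if_neg n0, if_pos z0, if_neg hu, if_neg hx, if_neg hv,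
                  if_neg hw, if_pos hd, if_true]
              have habs : pvAltGo rest (-1) = -1 := by
                cases rest with
                | nil => rfl
                | cons a b => simp only [pvAltGo, if_pos (show (-1:Int) < 0 by norm_num)]
              rw [hA, hB, habs]
              rfl
            · have hA : pvCheckAGo (ch :: rest) = false := by
                simp only [pvCheckAGo, if_neg hu, if_neg hx, if_neg hv, if_neg hw, if_neg hd, if_true]
              have hB : pvAltGo (ch :: rest) 0 = pvAltGo rest (-2) := by
                simp only [pvAltGo, if_neg n0, if_pos z0, if_neg hu, if_neg hx, if_neg hv,
                  if_neg hw, if_neg hd, if_true]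
              have habs : pvAltGo rest (-2) = -2 := by
                cases rest with
                | nil => rfl
                | cons a b => simp only [pvAltGo, if_pos (show (-2:Int) < 0 by norm_num)]
              rw [hA, hB, habs]
              rfl

-- ===== VERDICT (by name: the statement is the Claim_ definition above) =====
theorem check_disambiguation_py_spec : Claim_equal_check_disambiguation_py := by
  intro m _
  unfold Spec_check_disambiguation_py check_disambiguation_py check_disambiguation_py_alt
  exact pv_go_eq m.toList
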